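-- pv_equiv track=rewrite | github.com/emilianoGGauna/Chazam | show_similarities.py | score_hashes_against_database
-- ===== SOURCE A (Python) =====
-- def score_hashes_against_database(hashes, database):
--     matches_per_song = {}
--     for hash, (sample_time, _) in hashes.items():
--         if hash in database:
--             matching_occurences = database[hash]
--             for source_time, song_index in matching_occurences:
--                 if song_index not in matches_per_song:
--                     matches_per_song[song_index] = []
--                 matches_per_song[song_index].append((hash, sample_time, source_time))
--
--     scores = {}
--     for song_index, matches in matches_per_song.items():
--         song_scores_by_offset = {}
--         for hash, sample_time, source_time in matches:
--             delta = source_time - sample_time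
--             if delta not in song_scores_by_offset:
--                 song_scores_by_offset[delta] = 0
--             song_scores_by_offset[delta] += 1
--
--         max = (0, 0)
--         for offset, score in song_scores_by_offset.items():
--             if score > max[1]:
--                 max = (offset, score)
--
--         scores[song_index] = max
--
--     # Sort the scores for the user
--     scores = list(sorted(scores.items(), key=lambda x: x[1][1], reverse=True))
--
--     return scores
-- ===== SOURCE B (Python) =====
-- def score_hashes_against_database(hashes, database):
--     # Flatten all matches into one stream of (song, delta) pairs, count with a
--     # single flat counter keyed by the pair, then pick each song's best offset
--     # with max() over its first-seen deltas (max returns the first maximum,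
--     # matching the strict-> scan); finally the same stable sort by count.
--     stream = [(song, source_time - sample_time)
--               for h, (sample_time, _) in hashes.items() if h in database
--               for source_time, song in database[h]]
--     counts = {}
--     for key in stream:
--         counts[key] = counts.get(key, 0) + 1
--     result = []
--     for song in dict.fromkeys(s for s, _ in stream):
--         deltas = dict.fromkeys(d for s, d in stream if s == song)
--         best = max(deltas, key=lambda d: counts[(song, d)])
--         result.append((song, (best, counts[(song, best)])))
--     return sorted(result, key=lambda x: x[1][1], reverse=True)
-- ===== Notes on version B (the rewrite author's own statement) =====
-- stated objective: alternative
-- what changed: B replaces A's nested per-song match lists and per-song offset histograms by a flat pipeline: one flattened stream of (song, delta) pairs, a single counter keyed by the pair, dict.fromkeys for first-occurrence orders, and the builtin max() (first maximum) per song instead of A's hand-written strict-> scan.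
import Mathlib
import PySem

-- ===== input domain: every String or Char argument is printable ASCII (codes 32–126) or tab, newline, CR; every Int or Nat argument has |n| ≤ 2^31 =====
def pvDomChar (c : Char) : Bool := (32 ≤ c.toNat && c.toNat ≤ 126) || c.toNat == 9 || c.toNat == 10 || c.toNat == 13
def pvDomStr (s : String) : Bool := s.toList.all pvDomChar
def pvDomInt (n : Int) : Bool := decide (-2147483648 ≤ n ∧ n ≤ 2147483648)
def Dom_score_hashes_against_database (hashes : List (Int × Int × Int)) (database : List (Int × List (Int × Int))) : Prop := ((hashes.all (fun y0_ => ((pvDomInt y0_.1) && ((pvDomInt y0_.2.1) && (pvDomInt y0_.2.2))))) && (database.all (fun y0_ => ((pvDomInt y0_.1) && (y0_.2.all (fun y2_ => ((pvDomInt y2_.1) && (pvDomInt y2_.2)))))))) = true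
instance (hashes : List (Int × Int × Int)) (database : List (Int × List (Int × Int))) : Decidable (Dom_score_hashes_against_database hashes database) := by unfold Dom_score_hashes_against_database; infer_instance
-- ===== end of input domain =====

-- B replaces A's nested per-song match lists and offset histograms by a flat pipeline
-- (one flattened (song, delta) stream, one flat pair-keyed counter, dict.fromkeys dedups,
-- builtin first-maximum max()); same return value (alternative decomposition).

-- ===== PORT A =====
def score_hashes_against_database (hashes : List (Int × Int × Int)) (database : List (Int × List (Int × Int))) : List (Int × (Int × Int)) :=
  let hd := PySem.Dict.ofList hashes
  let db := PySem.Dict.ofList database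
  let matches_per_song : PySem.Dict Int (List (Int × Int × Int)) :=
    hd.items.foldl (fun mps p =>
      match db.get? p.1 with
      | some matching_occurences =>
          matching_occurences.foldl (fun mps q =>
            mps.insert q.2 (mps.getD q.2 [] ++ [(p.1, p.2.1, q.1)])) mps
      | none => mps) PySem.Dict.empty
  let scores : PySem.Dict Int (Int × Int) :=
    matches_per_song.items.foldl (fun sc p =>
      let song_scores_by_offset : PySem.Dict Int Int :=
        p.2.foldl (fun d m =>
          d.insert (m.2.2 - m.2.1) (d.getD (m.2.2 - m.2.1) 0 + 1)) PySem.Dict.empty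
      let mx := song_scores_by_offset.items.foldl
        (fun mx q => if q.2 > mx.2 then (q.1, q.2) else mx) ((0 : Int), (0 : Int))
      sc.insert p.1 mx) PySem.Dict.empty
  PySem.List.sorted scores.items (fun x => x.2.2) true

-- ===== PORT B =====
def score_hashes_against_database_alt (hashes : List (Int × Int × Int)) (database : List (Int × List (Int × Int))) : List (Int × (Int × Int)) :=
  let hd := PySem.Dict.ofList hashes
  let db := PySem.Dict.ofList database
  let stream : List (Int × Int) :=
    hd.items.flatMap (fun p =>
      if db.contains p.1 then (db.getD p.1 []).map (fun q => (q.2, q.1 - p.2.1)) else [])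
  let counts : PySem.Dict (Int × Int) Int :=
    stream.foldl (fun d key => d.insert key (d.getD key 0 + 1)) PySem.Dict.empty
  let result : List (Int × (Int × Int)) :=
    (PySem.List.dedup (stream.map (·.1))).foldl (fun acc song =>
      let deltas := PySem.List.dedup ((stream.filter (fun x => x.1 == song)).map (·.2))
      match PySem.List.max? deltas (fun d => counts.getD (song, d) 0) with
      | some best => acc ++ [(song, (best, counts.getD (song, best) 0))]
      | none => acc) []
  PySem.List.sorted result (fun x => x.2.2) true


-- ===== PRECONDITION & SPEC =====
def Spec_score_hashes_against_database (hashes : List (Int × Int × Int)) (database : List (Int × List (Int × Int))) (out : List (Int × (Int × Int))) : Prop := out = score_hashes_against_database_alt hashes database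
instance (hashes : List (Int × Int × Int)) (database : List (Int × List (Int × Int))) (out : List (Int × (Int × Int))) : Decidable (Spec_score_hashes_against_database hashes database out) := by unfold Spec_score_hashes_against_database; infer_instance

-- ===== CLAIM (what is proved, stated in full; the proofs are below) =====
def Claim_equal_score_hashes_against_database : Prop := ∀ (hashes : List (Int × Int × Int)) (database : List (Int × List (Int × Int))), Dom_score_hashes_against_database hashes database → Spec_score_hashes_against_database hashes database (score_hashes_against_database hashes database)

-- ===== LEMMAS AND PROOFS =====

lemma pv_foldl_flatMap {α β γ : Type} (g : α → List β) (f : γ → β → γ) (l : List α) (init : γ) :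
    (l.flatMap g).foldl f init = l.foldl (fun acc x => (g x).foldl f acc) init := by
  induction l generalizing init with
  | nil => rfl
  | cons x t ih => simp [List.flatMap_cons, List.foldl_append, ih]

lemma pv_get?_mapF {κ ν : Type} [BEq κ] [LawfulBEq κ] (v : κ → ν) (ds : List κ) (k : κ) :
    (PySem.Dict.mk (ds.map (fun s => (s, v s)))).get? k = if k ∈ ds then some (v k) else none := by
  induction ds with
  | nil => rfl
  | cons s t ih =>
    rw [List.map_cons, PySem.Dict.get?_mk_cons]
    by_cases h : s = k
    · subst h; simp
    · have : (s == k) = false := by simp [h]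
      simp [this, ih, Ne.symm h]

lemma pv_dedup_append {α : Type} [BEq α] [LawfulBEq α] (l : List α) (a : α) :
    PySem.List.dedup (l ++ [a]) = if a ∈ l then PySem.List.dedup l else PySem.List.dedup l ++ [a] := by
  have h1 : PySem.List.dedup (l ++ [a]) = PySem.Set.add (PySem.List.dedup l) a := by
    simp [PySem.List.dedup, PySem.Set.ofList, List.foldl_append, List.foldl]
  rw [h1]
  unfold PySem.Set.add
  by_cases hm : a ∈ l
  · have : PySem.Set.contains (PySem.List.dedup l) a = true := by
      simp [PySem.Set.contains, PySem.List.dedup, PySem.Set.mem_ofList, hm]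
    simp [this]
  · have : PySem.Set.contains (PySem.List.dedup l) a = false := by
      simp [PySem.Set.contains, PySem.List.dedup, PySem.Set.mem_ofList, hm]
    simp [this]

lemma pv_upsert_items {κ β ν : Type} [BEq κ] [LawfulBEq κ] (u : ν → β → ν) (e : ν) (L : List (κ × β)) :
    (L.foldl (fun d x => d.insert x.1 (u (d.getD x.1 e) x.2)) PySem.Dict.empty).items
    = (PySem.List.dedup (L.map (·.1))).map
        (fun k => (k, ((L.filter (fun x => x.1 == k)).map (·.2)).foldl u e)) := by
  induction L using List.reverseRecOn with
  | nil => rfl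
  | append_singleton l x ih =>
    rw [List.foldl_append, List.foldl_cons, List.foldl_nil]
    have hdict : (l.foldl (fun d x => d.insert x.1 (u (d.getD x.1 e) x.2)) PySem.Dict.empty)
        = PySem.Dict.mk ((PySem.List.dedup (l.map (·.1))).map
            (fun k => (k, ((l.filter (fun x => x.1 == k)).map (·.2)).foldl u e))) := by
      apply PySem.Dict.ext; exact ih
    rw [hdict]
    set vl : κ → ν := fun k => ((l.filter (fun x => x.1 == k)).map (·.2)).foldl u e with hvl
    have hget : ∀ k, (PySem.Dict.mk ((PySem.List.dedup (l.map (·.1))).map (fun k => (k, vl k)))).get? k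
        = if k ∈ l.map (·.1) then some (vl k) else none := by
      intro k
      rw [pv_get?_mapF]
      by_cases hk : k ∈ l.map (·.1) <;>
        simp [PySem.List.dedup, PySem.Set.mem_ofList, hk]
    have hmapfst : (l ++ [x]).map (·.1) = l.map (·.1) ++ [x.1] := by simp
    rw [hmapfst, pv_dedup_append]
    by_cases hm : x.1 ∈ l.map (·.1)
    · have hcont : (PySem.Dict.mk ((PySem.List.dedup (l.map (·.1))).map (fun k => (k, vl k)))).contains x.1 = true := by
        rw [PySem.Dict.contains_eq_isSome_get?, hget]; simp [hm]
      have hgetD : (PySem.Dict.mk ((PySem.List.dedup (l.map (·.1))).map (fun k => (k, vl k)))).getD x.1 e = vl x.1 := by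
        rw [PySem.Dict.getD_eq_get?_getD, hget]; simp [hm]
      rw [PySem.Dict.items_insert, hgetD, if_pos hcont, if_pos hm]
      rw [List.map_map]
      apply List.map_congr_left
      intro s _
      by_cases hs : s = x.1
      · have hfa : (l ++ [x]).filter (fun y => y.1 == s) = l.filter (fun y => y.1 == s) ++ [x] := by
          simp [List.filter_append, hs]
        simp [hs, hfa, hvl, List.foldl_append]
      · have hbeq : (s == x.1) = false := by simp [hs]
        have hfa : (l ++ [x]).filter (fun y => y.1 == s) = l.filter (fun y => y.1 == s) := by
          have h2 : (x.1 == s) = false := by simp [Ne.symm hs]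
          simp [List.filter_append, h2]
        simp [hbeq, hfa, hvl]
    · have hcont : (PySem.Dict.mk ((PySem.List.dedup (l.map (·.1))).map (fun k => (k, vl k)))).contains x.1 = false := by
        rw [PySem.Dict.contains_eq_isSome_get?, hget]; simp [hm]
      have hgetD : (PySem.Dict.mk ((PySem.List.dedup (l.map (·.1))).map (fun k => (k, vl k)))).getD x.1 e = e := by
        rw [PySem.Dict.getD_eq_get?_getD, hget]; simp [hm]
      rw [PySem.Dict.items_insert, hgetD, if_neg (by rw [hcont]; simp), if_neg hm]
      rw [List.map_append]
      congr 1
      · apply List.map_congr_left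
        intro s hsmem
        have hsmem' : s ∈ l.map (·.1) := by
          unfold PySem.List.dedup at hsmem
          exact (PySem.Set.mem_ofList _ _).mp hsmem
        have hs : s ≠ x.1 := fun h => hm (h ▸ hsmem')
        have hx1s : (x.1 == s) = false := by simp [Ne.symm hs]
        have hfa : (l ++ [x]).filter (fun y => y.1 == s) = l.filter (fun y => y.1 == s) := by
          simp [List.filter_append, hx1s]
        simp [hfa, hvl]
      · have hfilt : l.filter (fun y => y.1 == x.1) = [] := by
          rw [List.filter_eq_nil_iff]
          intro y hy hbeq
          exact hm (List.mem_map.mpr ⟨y, hy, by simpa using hbeq⟩)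
        have hfa : (l ++ [x]).filter (fun y => y.1 == x.1) = [x] := by
          simp [List.filter_append, hfilt]
        simp [hfa, hvl, hfilt]

lemma pv_insert_fold_fresh {κ ν μ : Type} [BEq κ] [LawfulBEq κ] (g : κ × μ → ν) (l : List (κ × μ)) (d : PySem.Dict κ ν)
    (hfresh : ∀ p ∈ l, d.contains p.1 = false) (hnodup : (l.map (·.1)).Nodup) :
    (l.foldl (fun d p => d.insert p.1 (g p)) d).items = d.items ++ l.map (fun p => (p.1, g p)) := by
  induction l generalizing d with
  | nil => simp
  | cons p t ih =>
    rw [List.foldl_cons]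
    have hc : d.contains p.1 = false := hfresh p (by simp)
    have hins : (d.insert p.1 (g p)).items = d.items ++ [(p.1, g p)] := by
      rw [PySem.Dict.items_insert, if_neg (by rw [hc]; simp)]
    have hfresh' : ∀ q ∈ t, (d.insert p.1 (g p)).contains q.1 = false := by
      intro q hq
      rcases d with ⟨items⟩
      have : ({ items := items } : PySem.Dict κ ν).insert p.1 (g p) = PySem.Dict.mk (items ++ [(p.1, g p)]) :=
        PySem.Dict.ext hins
      rw [this, PySem.Dict.contains_mk, List.any_append]
      have h1 : items.any (fun r => r.1 == q.1) = false := by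
        have := hfresh q (by simp [hq])
        rwa [PySem.Dict.contains_mk] at this
      have h2 : (p.1 == q.1) = false := by
        have hnm : p.1 ∉ t.map (·.1) := by
          rw [List.map_cons, List.nodup_cons] at hnodup
          exact hnodup.1
        have : p.1 ≠ q.1 := fun h => hnm (List.mem_map.mpr ⟨q, hq, h.symm⟩)
        simp [this]
      simp [h1, h2]
    rw [ih _ hfresh' (by rw [List.map_cons, List.nodup_cons] at hnodup; exact hnodup.2), hins]
    simp

lemma pv_max?_cons {α : Type} (k : α → Int) (t : List α) (d : α) :
    PySem.List.max? (d :: t) k = some (t.foldl (fun a x => if k a < k x then x else a) d) := by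
  induction t generalizing d with
  | nil => rfl
  | cons x t ih =>
    have h1 : PySem.List.max? (d :: x :: t) k
        = PySem.List.max? ((if k d < k x then x else d) :: t) k := by
      by_cases h : k d < k x <;> simp [PySem.List.max?, h]
    rw [h1, ih, List.foldl_cons]

lemma pv_scan_inner (k : Int → Int) (t : List Int) (m : Int) :
    (t.map (fun d => (d, k d))).foldl (fun mx q => if q.2 > mx.2 then (q.1, q.2) else mx) (m, k m)
    = (let r := t.foldl (fun a x => if k a < k x then x else a) m; (r, k r)) := by
  induction t generalizing m with
  | nil => rfl
  | cons d t ih =>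
    by_cases h : k m < k d
    · simp [h, ih]
    · simp [h, ih]

lemma pv_scan_eq_max? (k : Int → Int) (ds : List Int) (hpos : ∀ d ∈ ds, 1 ≤ k d) :
    (ds.map (fun d => (d, k d))).foldl (fun mx q => if q.2 > mx.2 then (q.1, q.2) else mx) ((0 : Int), (0 : Int))
    = match PySem.List.max? ds k with
      | some m => (m, k m)
      | none => ((0 : Int), (0 : Int)) := by
  cases ds with
  | nil => rfl
  | cons d t =>
    have hstep : (0 : Int) < k d := by have := hpos d (by simp); omega
    rw [List.map_cons, List.foldl_cons]
    rw [show (if (d, k d).2 > ((0:Int),(0:Int)).2 then ((d, k d).1, (d, k d).2) else ((0:Int),(0:Int))) = (d, k d) by simp [hstep]]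
    rw [pv_scan_inner, pv_max?_cons k t d]

lemma pv_len {β : Type} (l : List β) (a : Int) :
    l.foldl (fun v _ => v + 1) a = a + l.length := by
  induction l generalizing a with
  | nil => simp
  | cons x t ih => simp [ih]; omega

lemma pv_count_filter (stream : List (Int × Int)) (s d : Int) :
    ((stream.filter (fun x => x.1 == s)).map (·.2)).count d = stream.count (s, d) := by
  induction stream with
  | nil => rfl
  | cons x t ih =>
    by_cases h1 : x.1 = s
    · by_cases h2 : x.2 = d
      · have hx : x = (s, d) := by cases x; simp_all
        simp [hx, List.count_cons, ih]
      · have hx : x ≠ (s, d) := by cases x; simp_all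
        simp [h1, hx, h2, ih]
    · have hx : x ≠ (s, d) := by cases x; simp_all
      simp [h1, hx, ih]

-- the per-song "first maximal offset with its count" selector both programs compute
def pvG (dl : List Int) : Int × Int :=
  match PySem.List.max? (PySem.List.dedup dl) (fun d => ((dl.count d : Int))) with
  | some m => (m, (dl.count m : Int))
  | none => ((0 : Int), (0 : Int))

-- the flattened match stream (A side view: song ↦ full match triple)
def pvS (hashes : List (Int × Int × Int)) (database : List (Int × List (Int × Int))) : List (Int × (Int × Int × Int)) :=
  (PySem.Dict.ofList hashes).items.flatMap (fun p =>
    if (PySem.Dict.ofList database).contains p.1 then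
      ((PySem.Dict.ofList database).getD p.1 []).map (fun q => (q.2, (p.1, p.2.1, q.1)))
    else [])

lemma pv_map_fst_pairF {κ ν : Type} (f : κ → ν) (l : List κ) :
    (l.map (fun s => (s, f s))).map (·.1) = l := by
  induction l with
  | nil => rfl
  | cons a t ih => simp [ih]

def pvDl (S : List (Int × (Int × Int × Int))) (s : Int) : List Int :=
  ((S.filter (fun x => x.1 == s)).map (·.2)).map (fun m => m.2.2 - m.2.1)

lemma pv_map_fst_pair {κ : Type} (l : List κ) : (l.map (fun k => (k, (0 : Int)))).map (·.1) = l := by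
  induction l with
  | nil => rfl
  | cons a t ih => simp [ih]

lemma pv_counter_items {κ : Type} [BEq κ] [LawfulBEq κ] (l : List κ) :
    (l.foldl (fun d k => d.insert k (d.getD k 0 + 1)) PySem.Dict.empty).items
    = (PySem.List.dedup l).map (fun k => (k, (l.count k : Int))) := by
  have hfold : l.foldl (fun d k => d.insert k (d.getD k 0 + 1)) PySem.Dict.empty
      = (l.map (fun k => (k, (0 : Int)))).foldl
          (fun d x => d.insert x.1 ((fun (v : Int) (_ : Int) => v + 1) (d.getD x.1 0) x.2)) PySem.Dict.empty := by
    rw [List.foldl_map]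
  rw [hfold]
  rw [pv_upsert_items (fun (v : Int) (_ : Int) => v + 1) 0 (l.map (fun k => (k, (0 : Int))))]
  rw [pv_map_fst_pair]
  apply List.map_congr_left
  intro k _
  have h2 : (l.map (fun k => (k, (0 : Int)))).filter (fun x => x.1 == k)
      = (l.filter (fun k' => k' == k)).map (fun k => (k, (0 : Int))) := by
    rw [List.filter_map]
    rfl
  rw [h2, List.map_map]
  have h3 : ((l.filter (fun k' => k' == k)).map ((·.2) ∘ (fun k => (k, (0:Int))))).foldl
      (fun (v : Int) (_ : Int) => v + 1) 0
      = ((l.filter (fun k' => k' == k)).map ((·.2) ∘ (fun k => (k, (0:Int))))).length := by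
    rw [pv_len]; simp
  rw [h3]
  simp [List.count_eq_countP, List.countP_eq_length_filter]

lemma pv_counter_getD {κ : Type} [BEq κ] [LawfulBEq κ] (l : List κ) (key : κ) :
    (l.foldl (fun d k => d.insert k (d.getD k 0 + 1)) PySem.Dict.empty).getD key 0 = (l.count key : Int) := by
  have hd : (l.foldl (fun d k => d.insert k (d.getD k 0 + 1)) PySem.Dict.empty)
      = PySem.Dict.mk ((PySem.List.dedup l).map (fun k => (k, (l.count k : Int)))) :=
    PySem.Dict.ext (pv_counter_items l)
  rw [hd, PySem.Dict.getD_eq_get?_getD, pv_get?_mapF]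
  by_cases hm : key ∈ l
  · simp [hm]
  · simp [hm, List.count_eq_zero.mpr hm]

-- A's per-song computation: histogram then strict-> scan
def pvA2 (ms : List (Int × Int × Int)) : Int × Int :=
  ((ms.foldl (fun d m => d.insert (m.2.2 - m.2.1) (d.getD (m.2.2 - m.2.1) 0 + 1)) PySem.Dict.empty).items).foldl
    (fun mx q => if q.2 > mx.2 then (q.1, q.2) else mx) ((0 : Int), (0 : Int))

lemma pvA2_eq (ms : List (Int × Int × Int)) :
    pvA2 ms = pvG (ms.map (fun m => m.2.2 - m.2.1)) := by
  unfold pvA2 pvG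
  have hh : (ms.foldl (fun (d : PySem.Dict Int Int) m => d.insert (m.2.2 - m.2.1) (d.getD (m.2.2 - m.2.1) 0 + 1)) PySem.Dict.empty)
      = ((ms.map (fun m => m.2.2 - m.2.1)).foldl (fun (d : PySem.Dict Int Int) k => d.insert k (d.getD k 0 + 1)) PySem.Dict.empty) := by
    rw [List.foldl_map]
  conv_lhs => rw [hh]
  rw [pv_counter_items]
  rw [pv_scan_eq_max? (fun d => ((ms.map (fun m => m.2.2 - m.2.1)).count d : Int))]
  intro d hd
  have hd' : d ∈ ms.map (fun m => m.2.2 - m.2.1) := by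
    unfold PySem.List.dedup at hd
    exact (PySem.Set.mem_ofList _ _).mp hd
  exact_mod_cast List.one_le_count_iff.mpr hd'

lemma pvA_eq (hashes : List (Int × Int × Int)) (database : List (Int × List (Int × Int))) :
    score_hashes_against_database hashes database
    = PySem.List.sorted
        ((PySem.List.dedup ((pvS hashes database).map (·.1))).map
          (fun s => (s, pvG (pvDl (pvS hashes database) s))))
        (fun x => x.2.2) true := by
  simp only [score_hashes_against_database]
  have hA1 : (PySem.Dict.ofList hashes).items.foldl (fun mps p =>
      match (PySem.Dict.ofList database).get? p.1 with
      | some matching_occurences =>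
          matching_occurences.foldl (fun mps q =>
            mps.insert q.2 (mps.getD q.2 [] ++ [(p.1, p.2.1, q.1)])) mps
      | none => mps) PySem.Dict.empty
      = (pvS hashes database).foldl (fun d x => d.insert x.1 (d.getD x.1 [] ++ [x.2])) PySem.Dict.empty := by
    rw [pvS, pv_foldl_flatMap]
    apply PySem.List.foldl_congr_mem
    intro acc p _
    cases hq : (PySem.Dict.ofList database).get? p.1 with
    | none =>
      have hc : (PySem.Dict.ofList database).contains p.1 = false := by
        rw [PySem.Dict.contains_eq_isSome_get?, hq]; rfl
      simp [hc]
    | some occs =>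
      have hc : (PySem.Dict.ofList database).contains p.1 = true := by
        rw [PySem.Dict.contains_eq_isSome_get?, hq]; rfl
      have hg : (PySem.Dict.ofList database).getD p.1 [] = occs := by
        rw [PySem.Dict.getD_eq_get?_getD, hq]; rfl
      simp only [hc, if_true, hg, List.foldl_map]
  rw [hA1]
  have hA2 : ((pvS hashes database).foldl (fun d x => d.insert x.1 (d.getD x.1 [] ++ [x.2])) PySem.Dict.empty)
      = PySem.Dict.mk ((PySem.List.dedup ((pvS hashes database).map (·.1))).map
          (fun s => (s, ((pvS hashes database).filter (fun x => x.1 == s)).map (·.2)))) := by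
    apply PySem.Dict.ext
    have h : ((pvS hashes database).foldl (fun d x => d.insert x.1 (d.getD x.1 [] ++ [x.2])) PySem.Dict.empty).items
        = (PySem.List.dedup ((pvS hashes database).map (·.1))).map
            (fun k => (k, (((pvS hashes database).filter (fun x => x.1 == k)).map (·.2)).foldl (fun v m => v ++ [m]) [])) :=
      pv_upsert_items (fun v m => v ++ [m]) [] (pvS hashes database)
    rw [h]
    apply List.map_congr_left
    intro s _
    rw [PySem.List.foldl_append_singleton_eq_self]
    simp
  rw [hA2]
  have hbody : (fun (sc : PySem.Dict Int (Int × Int)) (p : Int × List (Int × Int × Int)) =>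
      sc.insert p.1 ((p.2.foldl (fun d m =>
          d.insert (m.2.2 - m.2.1) (d.getD (m.2.2 - m.2.1) 0 + 1)) PySem.Dict.empty).items.foldl
        (fun mx q => if q.2 > mx.2 then (q.1, q.2) else mx) ((0 : Int), (0 : Int))))
      = (fun sc p => sc.insert p.1 (pvA2 p.2)) := rfl
  rw [hbody]
  have hL : ((PySem.List.dedup ((pvS hashes database).map (·.1))).map
      (fun s => (s, ((pvS hashes database).filter (fun x => x.1 == s)).map (·.2)))).map (·.1)
      = PySem.List.dedup ((pvS hashes database).map (·.1)) :=
    pv_map_fst_pairF _ _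
  have hA3 := pv_insert_fold_fresh (fun p => pvA2 p.2)
    ((PySem.List.dedup ((pvS hashes database).map (·.1))).map
      (fun s => (s, ((pvS hashes database).filter (fun x => x.1 == s)).map (·.2))))
    PySem.Dict.empty (fun p _ => rfl) (by rw [hL]; exact PySem.List.nodup_dedup _)
  rw [show (PySem.Dict.mk ((PySem.List.dedup ((pvS hashes database).map (·.1))).map
      (fun s => (s, ((pvS hashes database).filter (fun x => x.1 == s)).map (·.2))))).items
      = (PySem.List.dedup ((pvS hashes database).map (·.1))).map
          (fun s => (s, ((pvS hashes database).filter (fun x => x.1 == s)).map (·.2))) from rfl]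
  rw [hA3]
  rw [show (PySem.Dict.empty : PySem.Dict Int (Int × Int)).items = ([] : List (Int × (Int × Int))) from rfl,
    List.nil_append, List.map_map]
  congr 1
  apply List.map_congr_left
  intro s _
  show (s, pvA2 (((pvS hashes database).filter (fun x => x.1 == s)).map (·.2)))
      = (s, pvG (pvDl (pvS hashes database) s))
  rw [pvA2_eq]
  rfl

lemma pvB_eq (hashes : List (Int × Int × Int)) (database : List (Int × List (Int × Int))) :
    score_hashes_against_database_alt hashes database
    = PySem.List.sorted
        ((PySem.List.dedup ((pvS hashes database).map (·.1))).map
          (fun s => (s, pvG (pvDl (pvS hashes database) s))))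
        (fun x => x.2.2) true := by
  simp only [score_hashes_against_database_alt]
  have hstream : (PySem.Dict.ofList hashes).items.flatMap (fun p =>
        if (PySem.Dict.ofList database).contains p.1 then
          ((PySem.Dict.ofList database).getD p.1 []).map (fun q => (q.2, q.1 - p.2.1))
        else [])
      = (pvS hashes database).map (fun x => (x.1, x.2.2.2 - x.2.2.1)) := by
    rw [pvS, List.map_flatMap]
    have hfun : ∀ p : Int × Int × Int,
        ((if (PySem.Dict.ofList database).contains p.1 then
            ((PySem.Dict.ofList database).getD p.1 []).map (fun q => (q.2, (p.1, p.2.1, q.1)))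
          else []).map (fun x => (x.1, x.2.2.2 - x.2.2.1)))
        = (if (PySem.Dict.ofList database).contains p.1 then
            ((PySem.Dict.ofList database).getD p.1 []).map (fun q => (q.2, q.1 - p.2.1))
          else []) := by
      intro p
      by_cases hc : (PySem.Dict.ofList database).contains p.1
      · simp only [hc, if_true, List.map_map]
        rfl
      · simp [hc]
    rw [show (fun p => (if (PySem.Dict.ofList database).contains p.1 then
            ((PySem.Dict.ofList database).getD p.1 []).map (fun q => (q.2, (p.1, p.2.1, q.1)))
          else []).map (fun x => (x.1, x.2.2.2 - x.2.2.1)))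
        = (fun p : Int × Int × Int => (if (PySem.Dict.ofList database).contains p.1 then
            ((PySem.Dict.ofList database).getD p.1 []).map (fun q => (q.2, q.1 - p.2.1))
          else [])) from funext hfun]
  rw [hstream]
  have hsongs : (((pvS hashes database).map (fun x => (x.1, x.2.2.2 - x.2.2.1))).map (·.1))
      = (pvS hashes database).map (·.1) := by
    rw [List.map_map]; rfl
  have hfilt : ∀ s : Int, ((((pvS hashes database).map (fun x => (x.1, x.2.2.2 - x.2.2.1))).filter
        (fun x => x.1 == s)).map (·.2)) = pvDl (pvS hashes database) s := by
    intro s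
    rw [List.filter_map, List.map_map, pvDl, List.map_map]; rfl
  have hkey : ∀ (s d : Int),
      (((pvS hashes database).map (fun x => (x.1, x.2.2.2 - x.2.2.1))).foldl
        (fun d key => d.insert key (d.getD key 0 + 1)) (PySem.Dict.empty : PySem.Dict (Int × Int) Int)).getD (s, d) (0 : Int)
      = ((pvDl (pvS hashes database) s).count d : Int) := by
    intro s d
    rw [pv_counter_getD, ← pv_count_filter, hfilt s]
  rw [hsongs]
  have hres : (PySem.List.dedup ((pvS hashes database).map (·.1))).foldl (fun acc song =>
        match PySem.List.max?
            (PySem.List.dedup ((((pvS hashes database).map (fun x => (x.1, x.2.2.2 - x.2.2.1))).filter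
              (fun x => x.1 == song)).map (·.2)))
            (fun d => (((pvS hashes database).map (fun x => (x.1, x.2.2.2 - x.2.2.1))).foldl
              (fun d key => d.insert key (d.getD key 0 + 1)) (PySem.Dict.empty : PySem.Dict (Int × Int) Int)).getD (song, d) (0 : Int)) with
        | some best => acc ++ [(song, (best, (((pvS hashes database).map (fun x => (x.1, x.2.2.2 - x.2.2.1))).foldl
              (fun d key => d.insert key (d.getD key 0 + 1)) (PySem.Dict.empty : PySem.Dict (Int × Int) Int)).getD (song, best) (0 : Int)))]
        | none => acc) []
      = (PySem.List.dedup ((pvS hashes database).map (·.1))).map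
          (fun s => (s, pvG (pvDl (pvS hashes database) s))) := by
    have hcongr : ∀ (acc : List (Int × (Int × Int))) (s : Int), s ∈ PySem.List.dedup ((pvS hashes database).map (·.1)) →
        (match PySem.List.max?
            (PySem.List.dedup ((((pvS hashes database).map (fun x => (x.1, x.2.2.2 - x.2.2.1))).filter
              (fun x => x.1 == s)).map (·.2)))
            (fun d => (((pvS hashes database).map (fun x => (x.1, x.2.2.2 - x.2.2.1))).foldl
              (fun d key => d.insert key (d.getD key 0 + 1)) (PySem.Dict.empty : PySem.Dict (Int × Int) Int)).getD (s, d) (0 : Int)) with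
        | some best => acc ++ [(s, (best, (((pvS hashes database).map (fun x => (x.1, x.2.2.2 - x.2.2.1))).foldl
              (fun d key => d.insert key (d.getD key 0 + 1)) (PySem.Dict.empty : PySem.Dict (Int × Int) Int)).getD (s, best) (0 : Int)))]
        | none => acc)
        = acc ++ [(s, pvG (pvDl (pvS hashes database) s))] := by
      intro acc s hs
      have hs' : s ∈ (pvS hashes database).map (·.1) := by
        unfold PySem.List.dedup at hs
        exact (PySem.Set.mem_ofList _ _).mp hs
      obtain ⟨x, hx, hxs⟩ := List.mem_map.mp hs'
      have hmemdl : (x.2.2.2 - x.2.2.1) ∈ pvDl (pvS hashes database) s := by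
        unfold pvDl
        rw [List.map_map]
        exact List.mem_map.mpr ⟨x, List.mem_filter.mpr ⟨hx, by simp [hxs]⟩, rfl⟩
      have hmemdd : (x.2.2.2 - x.2.2.1) ∈ PySem.List.dedup (pvDl (pvS hashes database) s) := by
        unfold PySem.List.dedup
        exact (PySem.Set.mem_ofList _ _).mpr hmemdl
      rw [hfilt s]
      rw [show (fun d => (((pvS hashes database).map (fun x => (x.1, x.2.2.2 - x.2.2.1))).foldl
              (fun d key => d.insert key (d.getD key 0 + 1)) (PySem.Dict.empty : PySem.Dict (Int × Int) Int)).getD (s, d) (0 : Int))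
          = (fun d => ((pvDl (pvS hashes database) s).count d : Int)) from funext (hkey s)]
      cases hdl : PySem.List.dedup (pvDl (pvS hashes database) s) with
      | nil => rw [hdl] at hmemdd; cases hmemdd
      | cons d0 t0 =>
        rw [pv_max?_cons]
        simp only [hkey s]
        simp only [pvG, hdl, pv_max?_cons]
    rw [PySem.List.foldl_congr_mem _ _
        (fun (acc : List (Int × (Int × Int))) s => acc ++ [(s, pvG (pvDl (pvS hashes database) s))]) _ hcongr]
    rw [PySem.List.foldl_append_singleton_eq_map (fun s => (s, pvG (pvDl (pvS hashes database) s)))]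
    simp
  rw [hres]


-- ===== VERDICT (by name: the statement is the Claim_ definition above) =====
theorem score_hashes_against_database_spec : Claim_equal_score_hashes_against_database := by
  intro hashes database _
  unfold Spec_score_hashes_against_database
  rw [pvA_eq, pvB_eq]
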